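-- pv_equiv track=rewrite | github.com/Alexander-Berg/2022-tests-examples | billing/balance_tests/btestlib/passport_steps.py | _filter_cookies_by_domain
-- ===== SOURCE A (Python) =====
-- def _filter_cookies_by_domain(cookies, domain):
--     domain_list = [domain]
--     domain_parts = domain.split('.')[1:]
--     while domain_parts:
--         subdomain = '.'.join(domain_parts)
--         domain_list.extend(['.' + subdomain, subdomain])
--         domain_parts = domain_parts[1:]
--
--     return [cookie for cookie in cookies if cookie['domain'] in domain_list]
-- ===== SOURCE B (Python) =====
-- def _filter_cookies_by_domain(cookies, domain):
--     def _matches(cd):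
--         s = cd[1:] if cd.startswith('.') else cd
--         return cd == domain or domain.endswith('.' + s)
--     return [cookie for cookie in cookies if _matches(cookie['domain'])]
-- ===== Notes on version B (the rewrite author's own statement) =====
-- stated objective: simpler
-- what changed: B drops A's precomputed split/join suffix list and list membership entirely and decides each cookie with a constant-space per-cookie predicate: keep cd iff cd == domain or domain.endswith('.' + cd.lstrip-one-leading-dot).
import Mathlib
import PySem

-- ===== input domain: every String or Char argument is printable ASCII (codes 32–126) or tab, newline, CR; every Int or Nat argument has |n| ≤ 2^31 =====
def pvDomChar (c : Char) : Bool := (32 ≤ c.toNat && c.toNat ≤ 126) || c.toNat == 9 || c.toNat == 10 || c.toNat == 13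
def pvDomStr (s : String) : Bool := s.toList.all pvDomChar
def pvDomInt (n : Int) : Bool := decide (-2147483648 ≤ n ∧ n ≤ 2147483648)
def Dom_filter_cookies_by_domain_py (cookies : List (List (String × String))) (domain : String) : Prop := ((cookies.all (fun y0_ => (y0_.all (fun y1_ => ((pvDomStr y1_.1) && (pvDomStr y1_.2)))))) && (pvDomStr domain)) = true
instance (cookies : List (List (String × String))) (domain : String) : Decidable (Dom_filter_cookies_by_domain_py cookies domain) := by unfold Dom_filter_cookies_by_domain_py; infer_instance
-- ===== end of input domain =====

-- B replaces A's precomputed suffix list + list membership with a per-cookie startswith/endswith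
-- suffix predicate (objective: simpler). Return values only; neither implementation mutates its arguments.

-- ===== PORT A =====
-- the 'while domain_parts:' loop: each round appends '.'+subdomain and subdomain, then drops one part
def pvBuildList : List String → List String → List String
  | [], domain_list => domain_list
  | domain_parts@(_ :: rest), domain_list =>
      let subdomain := PySem.Str.join "." domain_parts
      pvBuildList rest (domain_list ++ ["." ++ subdomain, subdomain])

def filter_cookies_by_domain_py (cookies : List (List (String × String))) (domain : String) : List (List (String × String)) :=
  -- domain.split('.') : the separator "." is nonempty, so split? is always some
  let domain_parts := ((PySem.Str.split? domain ".").getD []).drop 1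
  let domain_list := pvBuildList domain_parts [domain]
  cookies.filter (fun cookie =>
    match PySem.Dict.get? (PySem.Dict.mk cookie) "domain" with
    | some cd => domain_list.contains cd
    | none => false)  -- Python raises KeyError here; excluded by Pre_

-- ===== PORT B =====
def pvSuffixMatch (domain cd : String) : Bool :=
  let s := if PySem.Str.startswith cd "." then PySem.Str.slice cd (some 1) none else cd
  cd == domain || PySem.Str.endswith domain ("." ++ s)

def filter_cookies_by_domain_py_alt (cookies : List (List (String × String))) (domain : String) : List (List (String × String)) :=
  cookies.filter (fun cookie =>
    match PySem.Dict.get? (PySem.Dict.mk cookie) "domain" with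
    | some cd => pvSuffixMatch domain cd
    | none => false)  -- Python raises KeyError here; excluded by Pre_

-- ===== PRECONDITION & SPEC =====
-- A evaluates cookie['domain'] and raises KeyError when a cookie lacks a 'domain' key; only those inputs are excluded.
def Pre_filter_cookies_by_domain_py (cookies : List (List (String × String))) (domain : String) : Prop :=
  ∀ cookie ∈ cookies, "domain" ∈ cookie.map Prod.fst
instance (cookies : List (List (String × String))) (domain : String) : Decidable (Pre_filter_cookies_by_domain_py cookies domain) := by unfold Pre_filter_cookies_by_domain_py; infer_instance

def pvWitness_filter_cookies_by_domain_py : (List (List (String × String))) × String :=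
  ([[("domain", "mail.yandex.ru")], [("domain", ".yandex.ru")], [("domain", "other.ru")]], "mail.yandex.ru")

def Spec_filter_cookies_by_domain_py (cookies : List (List (String × String))) (domain : String) (out : List (List (String × String))) : Prop := out = filter_cookies_by_domain_py_alt cookies domain
instance (cookies : List (List (String × String))) (domain : String) (out : List (List (String × String))) : Decidable (Spec_filter_cookies_by_domain_py cookies domain out) := by unfold Spec_filter_cookies_by_domain_py; infer_instance

-- ===== CLAIM (what is proved, stated in full; the proofs are below) =====
def Claim_equal_filter_cookies_by_domain_py : Prop := ∀ (cookies : List (List (String × String))) (domain : String), Dom_filter_cookies_by_domain_py cookies domain → Pre_filter_cookies_by_domain_py cookies domain → Spec_filter_cookies_by_domain_py cookies domain (filter_cookies_by_domain_py cookies domain)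

-- ===== LEMMAS AND PROOFS =====

-- PySem.Chars.splitOn with separator ['.'] is Mathlib's List.splitOn '.'
theorem pvGo_eq (fuel : Nat) : ∀ (l cur : List Char) (acc : List (List Char)), l.length ≤ fuel →
    PySem.Chars.splitOn.go ['.'] fuel l cur acc =
      acc.reverse ++ List.modifyHead (cur.reverse ++ ·) (List.splitOnP (· == '.') l) := by
  induction fuel with
  | zero =>
      intro l cur acc h
      have hl : l = [] := List.eq_nil_of_length_eq_zero (Nat.le_zero.mp h)
      subst hl
      simp [PySem.Chars.splitOn.go, List.splitOnP_nil]
  | succ fuel ih =>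
      intro l cur acc h
      cases l with
      | nil => simp [PySem.Chars.splitOn.go, List.splitOnP_nil]
      | cons c rest =>
          simp only [PySem.Chars.splitOn.go]
          by_cases hc : c = '.'
          · subst hc
            rw [if_pos (by simp [List.isPrefixOf])]
            rw [ih _ _ _ (Nat.le_of_succ_le_succ (by simpa using h))]
            rcases List.exists_cons_of_ne_nil (List.splitOnP_ne_nil (· == '.') rest) with ⟨h0, t0, h0t⟩
            simp [List.splitOnP_cons, h0t]
          · rw [if_neg (by simp [List.isPrefixOf, Ne.symm hc])]
            rw [ih _ _ _ (Nat.le_of_succ_le_succ (by simpa using h))]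
            rcases List.exists_cons_of_ne_nil (List.splitOnP_ne_nil (· == '.') rest) with ⟨h0, t0, h0t⟩
            simp [List.splitOnP_cons, h0t, hc]

theorem pvSplitOn_eq (d : List Char) : PySem.Chars.splitOn d ['.'] = List.splitOn '.' d := by
  rw [PySem.Chars.splitOn, pvGo_eq _ _ _ _ (Nat.le_succ_of_le le_rfl)]
  rcases List.exists_cons_of_ne_nil (List.splitOnP_ne_nil (· == '.') d) with ⟨h0, t0, h0t⟩
  simp [List.splitOn, h0t]

-- parts produced by splitOn contain no separator
theorem pvNoDot (d : List Char) : ∀ l ∈ List.splitOn '.' d, '.' ∉ l := by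
  induction d with
  | nil => intro l hl; simp [List.splitOn, List.splitOnP_nil] at hl; simp [hl]
  | cons c rest ih =>
      intro l hl
      simp only [List.splitOn, List.splitOnP_cons] at hl ih
      by_cases hc : c = '.'
      · subst hc
        simp at hl
        rcases hl with h | h
        · simp [h]
        · exact ih l h
      · simp [hc] at hl
        rcases List.exists_cons_of_ne_nil (List.splitOnP_ne_nil (· == '.') rest) with ⟨h0, t0, h0t⟩
        rw [h0t] at hl
        simp at hl
        rcases hl with h | h
        · subst h
          intro hmem
          rcases List.mem_cons.mp hmem with h | h
          · exact hc h.symm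
          · exact ih h0 (by rw [h0t]; exact List.mem_cons_self) h
        · exact ih l (by rw [h0t]; exact List.mem_cons_of_mem _ h)

-- the joins of the successive nonempty tails, in loop order
def pvJoinsC : List (List Char) → List (List Char)
  | [] => []
  | p :: rest => PySem.Chars.join ['.'] (p :: rest) :: pvJoinsC rest

theorem pv_suffix_append_cases {α : Type} {l a b : List α} (h : l <:+ a ++ b) :
    l <:+ b ∨ ∃ l', l = l' ++ b ∧ l' <:+ a := by
  rcases h with ⟨t, ht⟩
  rcases List.append_eq_append_iff.mp ht with ⟨as, h1, h2⟩ | ⟨bs, h1, h2⟩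
  · exact Or.inr ⟨as, h2, ⟨t, h1.symm⟩⟩
  · exact Or.inl ⟨bs, h2.symm⟩

-- the strings of the form '.'+t that are suffixes of a dot-joined list: t is a join of a proper tail
theorem pvSuffix_iff (ps : List (List Char)) (hnd : ∀ l ∈ ps, '.' ∉ l) (t : List Char) :
    ('.' :: t) <:+ PySem.Chars.join ['.'] ps ↔ t ∈ pvJoinsC ps.tail := by
  induction ps with
  | nil => simp [PySem.Chars.join, List.intercalate, pvJoinsC]
  | cons p rest ih =>
      cases rest with
      | nil =>
          have hj : PySem.Chars.join ['.'] [p] = p := by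
            simp [PySem.Chars.join, List.intercalate]
          rw [hj]
          simp only [List.tail_cons, pvJoinsC]
          constructor
          · intro h
            exact absurd (h.subset List.mem_cons_self) (hnd p List.mem_cons_self)
          · intro h; simp at h
      | cons q rest' =>
          have hjoin : PySem.Chars.join ['.'] (p :: q :: rest') = p ++ '.' :: PySem.Chars.join ['.'] (q :: rest') := by
            simp [PySem.Chars.join, List.intercalate, List.intersperse]
          rw [hjoin]
          have hp : '.' ∉ p := hnd p List.mem_cons_self
          have ihrest := ih (fun l hl => hnd l (List.mem_cons_of_mem _ hl))
          simp only [List.tail_cons] at ihrest ⊢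
          constructor
          · intro h
            rcases pv_suffix_append_cases h with h | ⟨l', hl', hl'p⟩
            · rcases List.suffix_cons_iff.mp h with h | h
              · have ht : t = PySem.Chars.join ['.'] (q :: rest') := by
                  simpa using h
                simp [pvJoinsC, ht]
              · have := ihrest.mp h
                simp only [pvJoinsC, List.mem_cons]
                right
                exact this
            · cases l' with
              | nil =>
                  simp only [List.nil_append, List.cons.injEq, true_and] at hl'
                  simp only [pvJoinsC, List.mem_cons]
                  exact Or.inl hl'
              | cons c l'' =>
                  exfalso
                  have hc : c = '.' := by
                    have := congrArg List.head? hl'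
                    simpa using this.symm
                  exact hp (hl'p.subset (by simp [hc]))
          · intro h
            simp only [pvJoinsC, List.mem_cons] at h
            rcases h with h | h
            · subst h
              refine List.IsSuffix.trans ?_ (List.suffix_append _ _)
              exact List.suffix_refl _
            · have hsfx : ('.' :: t) <:+ PySem.Chars.join ['.'] (q :: rest') := ihrest.mpr h
              refine List.IsSuffix.trans ?_ (List.suffix_append _ _)
              exact hsfx.trans (List.suffix_cons _ _)

-- membership in the list A builds, via pvJoinsC
theorem pvBuildList_mem (x : String) : ∀ (ps : List String) (dl : List String),
    x ∈ pvBuildList ps dl ↔ x ∈ dl ∨ ∃ t ∈ pvJoinsC (ps.map String.toList), x.toList = '.' :: t ∨ x.toList = t := by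
  intro ps
  induction ps with
  | nil => intro dl; simp [pvBuildList, pvJoinsC]
  | cons p rest ih =>
      intro dl
      rw [pvBuildList]
      rw [ih]
      have hjoin : (PySem.Str.join "." (p :: rest)).toList = PySem.Chars.join ['.'] ((p :: rest).map String.toList) := by
        simpa using PySem.Str.toList_join "." (p :: rest)
      simp only [List.map_cons, pvJoinsC, List.mem_cons]
      constructor
      · rintro (h | ⟨t, ht, hx⟩)
        · rcases List.mem_append.mp h with h | h
          · exact Or.inl h
          · right
            refine ⟨(PySem.Str.join "." (p :: rest)).toList, Or.inl (by rw [hjoin, List.map_cons]), ?_⟩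
            simp at h
            rcases h with h | h
            · left; rw [h, String.toList_append]; rfl
            · right; rw [h]
        · exact Or.inr ⟨t, Or.inr ht, hx⟩
      · rintro (h | ⟨t, ht, hx⟩)
        · exact Or.inl (List.mem_append.mpr (Or.inl h))
        · rcases ht with ht | ht
          · left
            apply List.mem_append.mpr
            right
            rcases hx with hx | hx
            · have : x = "." ++ PySem.Str.join "." (p :: rest) := by
                apply String.toList_inj.mp
                rw [hx, String.toList_append, hjoin, ht, List.map_cons]; rfl
              simp [this]
            · have : x = PySem.Str.join "." (p :: rest) := by
                apply String.toList_inj.mp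
                rw [hx, hjoin, ht, List.map_cons]
              simp [this]
          · exact Or.inr ⟨t, ht, hx⟩

-- B's dot-stripping, on char lists
theorem pvStrip_iff (dL cdL : List Char) :
    (∃ t, ('.' :: t) <:+ dL ∧ (cdL = '.' :: t ∨ cdL = t)) ↔
      ('.' :: (if cdL.head? = some '.' then cdL.tail else cdL)) <:+ dL := by
  cases cdL with
  | nil =>
      simp only [List.head?_nil, reduceCtorEq, if_false]
      constructor
      · rintro ⟨t, ht, h | h⟩
        · exact absurd h (by simp)
        · subst h; exact ht
      · intro h; exact ⟨[], h, Or.inr rfl⟩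
  | cons c u =>
      simp only [List.head?_cons, Option.some_inj, List.tail_cons]
      by_cases hc : c = '.'
      · subst hc
        rw [if_pos rfl]
        constructor
        · rintro ⟨t, ht, h | h⟩
          · have : u = t := by simpa using h
            subst this; exact ht
          · subst h
            exact (List.suffix_cons '.' ('.' :: u)).trans ht
        · intro h; exact ⟨u, h, Or.inl rfl⟩
      · rw [if_neg hc]
        constructor
        · rintro ⟨t, ht, h | h⟩
          · exact absurd (by simpa using congrArg List.head? h) hc
          · subst h; exact ht
        · intro h; exact ⟨c :: u, h, Or.inr rfl⟩

-- the per-string core: membership in A's domain_list equals B's suffix test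
theorem pvPred_eq (domain cd : String) :
    (pvBuildList (((PySem.Str.split? domain ".").getD []).drop 1) [domain]).contains cd
      = pvSuffixMatch domain cd := by
  have hparts : ((PySem.Str.split? domain ".").getD []).map String.toList = List.splitOn '.' domain.toList := by
    have h := PySem.Str.split?_map domain "."
    rw [show (".".toList) = ['.'] from rfl, PySem.Chars.split?] at h
    simp only [List.isEmpty_cons, Bool.false_eq_true, if_false] at h
    cases hs : PySem.Str.split? domain "." with
    | none => rw [hs] at h; simp at h
    | some parts =>
        rw [hs] at h
        simp only [Option.map_some, Option.getD_some] at h ⊢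
        rw [(Option.some_inj.mp h : parts.map String.toList = _), pvSplitOn_eq]
  have hd : PySem.Chars.join ['.'] (List.splitOn '.' domain.toList) = domain.toList := by
    simpa [PySem.Chars.join] using List.intercalate_splitOn domain.toList '.'
  rw [Bool.eq_iff_iff, List.contains_iff_mem, pvBuildList_mem]
  have hmap : ((((PySem.Str.split? domain ".").getD []).drop 1).map String.toList)
      = (List.splitOn '.' domain.toList).tail := by
    rw [List.map_drop, hparts, List.drop_one]
  rw [hmap]
  have hsfx := fun t => (pvSuffix_iff (List.splitOn '.' domain.toList) (pvNoDot domain.toList) t)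
  rw [pvSuffixMatch, Bool.or_eq_true, beq_iff_eq]
  have hends : ∀ s : String, (PySem.Str.endswith domain ("." ++ s) = true) ↔ ('.' :: s.toList) <:+ domain.toList := by
    intro s
    rw [PySem.Str.endswith_eq, PySem.Chars.endswith]
    rw [List.isSuffixOf_iff_suffix]
    rw [String.toList_append]
    rfl
  have hstrip : ((if PySem.Str.startswith cd "." then PySem.Str.slice cd (some 1) none else cd).toList)
      = (if cd.toList.head? = some '.' then cd.toList.tail else cd.toList) := by
    rw [PySem.Str.startswith_eq, PySem.Chars.startswith]
    cases hcd : cd.toList with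
    | nil => simp [hcd]
    | cons c u =>
        by_cases hc : c = '.'
        · subst hc
          rw [if_pos (by simp [List.isPrefixOf])]
          rw [PySem.Str.toList_slice, PySem.Chars.slice_eq_listSlice,
            PySem.List.slice_from _ (by norm_num : (0:Int) ≤ 1), hcd]
          simp
        · rw [if_neg (by simp [List.isPrefixOf, Ne.symm hc]), hcd]
          simp [hc]
  constructor
  · rintro (h | ⟨t, ht, hx⟩)
    · simp at h
      exact Or.inl h
    · right
      rw [hends, hstrip]
      rw [hd] at hsfx
      exact (pvStrip_iff domain.toList cd.toList).mp ⟨t, (hsfx t).mpr ht, by tauto⟩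
  · rintro (h | h)
    · exact Or.inl (by simp [h])
    · right
      rw [hends, hstrip] at h
      rcases (pvStrip_iff domain.toList cd.toList).mpr h with ⟨t, hsf, hx⟩
      rw [← hd] at hsf
      exact ⟨t, (hsfx t).mp (by rwa [hd] at hsf ⊢), by tauto⟩

theorem pvMain (cookies : List (List (String × String))) (domain : String) :
    filter_cookies_by_domain_py cookies domain = filter_cookies_by_domain_py_alt cookies domain := by
  rw [filter_cookies_by_domain_py, filter_cookies_by_domain_py_alt]
  apply List.filter_congr
  intro cookie _
  cases h : PySem.Dict.get? (PySem.Dict.mk cookie) "domain" with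
  | none => rfl
  | some cd => exact pvPred_eq domain cd

-- ===== VERDICT (by name: the statement is the Claim_ definition above) =====
theorem filter_cookies_by_domain_py_spec : Claim_equal_filter_cookies_by_domain_py := by
  intro cookies domain _ _
  unfold Spec_filter_cookies_by_domain_py
  exact pvMain cookies domain
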